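-- pv_equiv track=rewrite | github.com/manchivarusanthosh/PythonProjects | N-WordsCombination/AllPossibleSubsets.py | getcomb
-- ===== SOURCE A (Python) =====
-- def getcomb(words,n):
--     words = sorted(words)
--     items = list(range(len(words)))
--     old_comb = [[]]
--     new_comb = []
--     for i in range(n):
--         new_comb = []
--         for each in old_comb:
--             for item in items:
--                 if (each and item > each[-1] ) or len(each) == 0:
--                     new_comb.append(each + [item])
--             old_comb = new_comb
--
--     words_comb = []
--     for each in new_comb:
--         word_comb = []
--         for index in each:
--             word_comb.append(words[index])
--         words_comb.append(tuple(word_comb))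
--     return sorted(set(words_comb))
-- ===== SOURCE B (Python) =====
-- def getcomb(words, n):
--     ws = sorted(words)
--
--     def rec(start, chosen):
--         if len(chosen) == n:
--             return [tuple(chosen)]
--         out = []
--         for i in range(start, len(ws)):
--             out += rec(i + 1, chosen + [ws[i]])
--         return out
--
--     res = rec(0, []) if n > 0 else []
--     return sorted(set(res))
-- ===== Notes on version B (the rewrite author's own statement) =====
-- stated objective: alternative
-- what changed: Replaces A's iterative level-by-level (BFS) expansion of index lists, which rescans the whole index list for every partial combination at every level, by a depth-first recursive backtracking generator over the sorted words with a start index.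
import Mathlib
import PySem

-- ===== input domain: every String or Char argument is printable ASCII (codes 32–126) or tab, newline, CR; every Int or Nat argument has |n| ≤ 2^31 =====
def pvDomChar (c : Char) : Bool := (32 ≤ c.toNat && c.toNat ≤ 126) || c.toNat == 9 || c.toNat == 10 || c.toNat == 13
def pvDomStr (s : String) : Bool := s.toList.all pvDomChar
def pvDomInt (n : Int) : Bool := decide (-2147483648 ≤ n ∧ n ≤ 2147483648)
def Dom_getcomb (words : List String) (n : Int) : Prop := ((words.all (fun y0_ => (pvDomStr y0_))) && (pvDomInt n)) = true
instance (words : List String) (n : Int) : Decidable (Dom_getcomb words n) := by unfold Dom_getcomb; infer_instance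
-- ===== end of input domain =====

-- B replaces A's level-by-level (BFS) expansion of index lists by depth-first
-- recursive backtracking over the sorted words (alternative decomposition; return value only).

-- ===== PORT A =====
def getcomb (words : List String) (n : Int) : List (List String) :=
  let ws := PySem.List.sorted words (fun x => x) false
  let items := PySem.List.pyRange 0 (ws.length : Int) 1
  let st := (PySem.List.pyRange 0 n 1).foldl
    (fun st _ =>
      st.1.foldl
        (fun st2 each =>
          let nw := items.foldl
            (fun acc item =>
              if (each ≠ [] ∧ PySem.List.pyGetD each (-1) 0 < item) ∨ each.length = 0
              then acc ++ [each ++ [item]] else acc) st2.2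
          (nw, nw))
        (st.1, []))
    ([([] : List Int)], [])
  let wordsComb := st.2.foldl
    (fun acc each =>
      acc ++ [each.foldl (fun wc index => wc ++ [PySem.List.pyGetD ws index ""]) []]) []
  PySem.List.sorted (PySem.Set.ofList wordsComb) (fun x => x) false

-- ===== PORT B =====
def bRec (ws : List String) (n : Int) (start : Nat) (chosen : List String) : List (List String) :=
  if (chosen.length : Int) = n then [chosen]
  else
    (PySem.List.pyRange (start : Int) (ws.length : Int) 1).attach.foldl
      (fun out i =>
        out ++ bRec ws n (i.1.toNat + 1) (chosen ++ [PySem.List.pyGetD ws i.1 ""])) []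
termination_by ws.length - start
decreasing_by
  have h := PySem.List.mem_pyRange_one.mp i.2
  omega

def getcomb_alt (words : List String) (n : Int) : List (List String) :=
  let ws := PySem.List.sorted words (fun x => x) false
  let res := if 0 < n then bRec ws n 0 [] else []
  PySem.List.sorted (PySem.Set.ofList res) (fun x => x) false

-- ===== PRECONDITION & SPEC =====
def Spec_getcomb (words : List String) (n : Int) (out : List (List String)) : Prop := out = getcomb_alt words n
instance (words : List String) (n : Int) (out : List (List String)) : Decidable (Spec_getcomb words n out) := by unfold Spec_getcomb; infer_instance

-- ===== CLAIM (what is proved, stated in full; the proofs are below) =====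
def Claim_equal_getcomb : Prop := ∀ (words : List String) (n : Int), Dom_getcomb words n → Spec_getcomb words n (getcomb words n)

-- ===== LEMMAS AND PROOFS =====

-- closed form of A's inner filter/extend step on one partial index combination
def extA (its : List Int) (each : List Int) : List (List Int) :=
  (its.filter (fun item =>
    decide ((each ≠ [] ∧ PySem.List.pyGetD each (-1) 0 < item) ∨ each.length = 0))).map
    (fun item => each ++ [item])

-- A's per-`each` state update (definitionally the lambda inside getcomb's middle loop)
def stepA (its : List Int) (st2 : List (List Int) × List (List Int)) (each : List Int) :
    List (List Int) × List (List Int) :=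
  let nw := its.foldl
    (fun acc item =>
      if (each ≠ [] ∧ PySem.List.pyGetD each (-1) 0 < item) ∨ each.length = 0
      then acc ++ [each ++ [item]] else acc) st2.2
  (nw, nw)

-- A's BFS levels
def iterA (its : List Int) : Nat → List (List Int)
  | 0 => [[]]
  | k + 1 => (iterA its k).flatMap (extA its)

lemma filter_lt_cons (b x : Int) (xs : List Int) (h : ¬ b < x) :
    (x :: xs).filter (fun it => decide (b < it)) = xs.filter (fun it => decide (b < it)) := by
  simp [h]

lemma filter_lt_all (b : Int) (xs : List Int) (h : ∀ y ∈ xs, b < y) :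
    xs.filter (fun it => decide (b < it)) = xs :=
  List.filter_eq_self.mpr (fun y hy => by simpa using h y hy)

lemma stepA_eq (its : List Int) (st2 : List (List Int) × List (List Int)) (each : List Int) :
    stepA its st2 each = (st2.2 ++ extA its each, st2.2 ++ extA its each) := by
  simp only [stepA, extA]
  rw [PySem.List.foldl_append_ite
    (p := fun item => (each ≠ [] ∧ PySem.List.pyGetD each (-1) 0 < item) ∨ each.length = 0)
    (f := fun item => each ++ [item])]

lemma foldl_stepA (its : List Int) :
    ∀ (old α0 acc0 : List (List Int)),
      old.foldl (stepA its) (α0, acc0) =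
        ((if old = [] then α0 else acc0 ++ old.flatMap (extA its)),
          acc0 ++ old.flatMap (extA its)) := by
  intro old
  induction old with
  | nil => intro α0 acc0; simp
  | cons e rest ih =>
      intro α0 acc0
      simp only [List.foldl_cons, stepA_eq, ih]
      rcases rest with - | ⟨r, rs⟩ <;> simp

lemma level_stepA (its : List Int) (o : List (List Int)) :
    o.foldl (stepA its) (o, []) = (o.flatMap (extA its), o.flatMap (extA its)) := by
  rw [foldl_stepA]
  rcases o with - | ⟨e, rest⟩ <;> simp

lemma outerA (its : List Int) :
    ∀ m : Nat,
      (PySem.List.pyRange 0 (m : Int) 1).foldl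
          (fun st (_ : Int) => st.1.foldl (stepA its) (st.1, []))
          ([([] : List Int)], []) =
        if m = 0 then ([([] : List Int)], []) else (iterA its m, iterA its m) := by
  intro m
  induction m with
  | zero => simp [PySem.List.pyRange_one_eq_nil]
  | succ k ih =>
      have hsplit : PySem.List.pyRange 0 ((k + 1 : Nat) : Int) 1 =
          PySem.List.pyRange 0 (k : Int) 1 ++ [(k : Int)] := by
        have := PySem.List.pyRange_one_succ_right (a := 0) (b := (k : Int)) (by positivity)
        push_cast
        exact this
      rw [hsplit, List.foldl_append, ih]
      rcases Nat.eq_zero_or_pos k with hk | hk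
      · subst hk; simp [level_stepA, iterA]
      · rw [if_neg (by omega), if_neg (by omega)]
        simp [level_stepA, iterA]

lemma outerA_snd (its : List Int) (m : Nat) (hm : m ≠ 0) :
    ((PySem.List.pyRange 0 (m : Int) 1).foldl
        (fun st (_ : Int) => st.1.foldl (stepA its) (st.1, []))
        ([([] : List Int)], [])).2 = iterA its m := by
  rw [outerA, if_neg hm]

lemma extA_nil (its : List Int) : extA its [] = its.map (fun it => [it]) := by
  simp [extA]

lemma extA_ne_nil (its : List Int) (each : List Int) (h : each ≠ []) :
    extA its each =
      (its.filter (fun it => decide (each.getLast h < it))).map (fun it => each ++ [it]) := by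
  simp only [extA, PySem.List.pyGetD_neg_one (xs := each) (h := h)]
  congr 1
  apply List.filter_congr
  intro it _
  simp [h, List.length_eq_zero_iff]

-- one BFS step turns the lexicographic i-combinations of a strictly increasing
-- index list into its (i+1)-combinations
lemma flatMap_extA_combinations (its : List Int) (hs : its.Pairwise (· < ·)) :
    ∀ i : Nat,
      (PySem.List.combinations its i).flatMap (extA its) =
        PySem.List.combinations its (i + 1) := by
  induction its with
  | nil =>
      intro i
      rcases i with - | j
      · simp [PySem.List.combinations_zero, extA_nil, PySem.List.combinations_one]
      · simp [PySem.List.combinations_nil_succ]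
  | cons x xs ih =>
      intro i
      have hx : ∀ y ∈ xs, x < y := (List.pairwise_cons.mp hs).1
      have hxs : xs.Pairwise (· < ·) := (List.pairwise_cons.mp hs).2
      rcases i with - | j
      · simp [PySem.List.combinations_zero, extA_nil, PySem.List.combinations_one]
      · rw [PySem.List.combinations_cons_succ, List.flatMap_append, List.flatMap_map]
        have h1 : (PySem.List.combinations xs j).flatMap (fun e => extA (x :: xs) (x :: e)) =
            ((PySem.List.combinations xs j).flatMap (extA xs)).map (x :: ·) := by
          rw [List.map_flatMap]
          apply List.flatMap_congr
          intro e he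
          have hesub : e ⊆ xs := (PySem.List.sublist_of_mem_combinations he).subset
          rcases e with - | ⟨a, as⟩
          · rw [extA_ne_nil (x :: xs) [x] (by simp), extA_nil]
            rw [show ([x].getLast (by simp) : Int) = x from rfl]
            rw [filter_lt_cons x x xs (lt_irrefl x), filter_lt_all x xs hx]
            simp [List.map_map]
          · have hne : (a :: as) ≠ ([] : List Int) := by simp
            have hb : (a :: as).getLast hne ∈ xs := hesub (List.getLast_mem hne)
            have hxb : x < (a :: as).getLast hne := hx _ hb
            rw [extA_ne_nil (x :: xs) (x :: a :: as) (by simp),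
                extA_ne_nil xs (a :: as) hne]
            have hlast : (x :: a :: as).getLast (by simp) = (a :: as).getLast hne :=
              List.getLast_cons hne
            rw [hlast, filter_lt_cons _ x xs (not_lt.mpr (le_of_lt hxb))]
            simp [List.map_map, Function.comp_def]
        have h2 : (PySem.List.combinations xs (j + 1)).flatMap (extA (x :: xs)) =
            (PySem.List.combinations xs (j + 1)).flatMap (extA xs) := by
          apply List.flatMap_congr
          intro e he
          have hesub : e ⊆ xs := (PySem.List.sublist_of_mem_combinations he).subset
          have hlen : e.length = j + 1 := PySem.List.length_of_mem_combinations he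
          have hne : e ≠ [] := by intro h; simp [h] at hlen
          have hb : e.getLast hne ∈ xs := hesub (List.getLast_mem hne)
          have hxb : x < e.getLast hne := hx _ hb
          rw [extA_ne_nil (x :: xs) e hne, extA_ne_nil xs e hne,
              filter_lt_cons _ x xs (not_lt.mpr (le_of_lt hxb))]
        rw [h1, h2, ih hxs j, ih hxs (j + 1), PySem.List.combinations_cons_succ]

lemma iterA_eq_combinations (its : List Int) (hs : its.Pairwise (· < ·)) :
    ∀ k : Nat, iterA its k = PySem.List.combinations its k := by
  intro k
  induction k with
  | zero => simp [iterA, PySem.List.combinations_zero]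
  | succ j ih => rw [iterA, ih, flatMap_extA_combinations its hs j]

-- A computes sorted(set(...)) of the lexicographic n-combinations of the sorted words
lemma getcomb_eq_mid (words : List String) (n : Int) :
    getcomb words n =
      PySem.List.sorted
        (PySem.Set.ofList
          (if 0 < n then
            PySem.List.combinations (PySem.List.sorted words (fun x => x) false) n.toNat
          else []))
        (fun x => x) false := by
  set ws := PySem.List.sorted words (fun x => x) false with hws
  set its := PySem.List.pyRange 0 (ws.length : Int) 1 with hits
  have hunf : getcomb words n =
      PySem.List.sorted
        (PySem.Set.ofList
          (((PySem.List.pyRange 0 n 1).foldl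
              (fun st (_ : Int) => st.1.foldl (stepA its) (st.1, []))
              ([([] : List Int)], [])).2.foldl
            (fun acc each =>
              acc ++ [each.foldl (fun wc index => wc ++ [PySem.List.pyGetD ws index ""]) []])
            []))
        (fun x => x) false := rfl
  rw [hunf]
  rcases le_or_gt n 0 with hn | hn
  · rw [PySem.List.pyRange_one_eq_nil (by omega), if_neg (by omega)]
    simp
  · have hcast : ((n.toNat : Nat) : Int) = n := Int.toNat_of_nonneg (le_of_lt hn)
    have hrange : PySem.List.pyRange 0 n 1 = PySem.List.pyRange 0 ((n.toNat : Nat) : Int) 1 := by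
      rw [hcast]
    rw [hrange, outerA_snd its n.toNat (by omega), if_pos hn]
    have hpw : its.Pairwise (· < ·) := by
      rw [hits]; exact PySem.List.pairwise_lt_pyRange_one 0 _
    rw [iterA_eq_combinations its hpw n.toNat]
    congr 1
    -- the word-tuple building loop is a map, and mapping indices to words turns
    -- index combinations into word combinations
    rw [PySem.List.foldl_append_singleton_eq_map
      (l := PySem.List.combinations its n.toNat) (acc := [])
      (f := fun each : List Int =>
        List.foldl (fun wc index => wc ++ [PySem.List.pyGetD ws index ""]) [] each)]
    rw [List.nil_append]
    have hmapmap :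
        (PySem.List.combinations its n.toNat).map
            (fun each => each.foldl (fun wc index => wc ++ [PySem.List.pyGetD ws index ""]) []) =
          (PySem.List.combinations its n.toNat).map
            (List.map (fun index => PySem.List.pyGetD ws index "")) := by
      apply List.map_congr_left
      intro e _
      rw [PySem.List.foldl_append_singleton_eq_map (l := e) (acc := [])
        (f := fun index => PySem.List.pyGetD ws index "")]
      simp
    rw [hmapmap, ← PySem.List.combinations_map, hits,
        PySem.List.map_pyGetD_pyRange_zero' ws ""]

-- B's recursion yields the combinations with the chosen prefix attached
lemma bRec_flatMap (ws : List String) (n : Int) (start : Nat) (chosen : List String)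
    (h : ¬ (chosen.length : Int) = n) :
    bRec ws n start chosen =
      (PySem.List.pyRange (start : Int) (ws.length : Int) 1).flatMap
        (fun i => bRec ws n (i.toNat + 1) (chosen ++ [PySem.List.pyGetD ws i ""])) := by
  rw [bRec, if_neg h]
  rw [PySem.List.foldl_append_eq_flatMap
    (g := fun i : {x // x ∈ PySem.List.pyRange (start : Int) (ws.length : Int) 1} =>
      bRec ws n (i.1.toNat + 1) (chosen ++ [PySem.List.pyGetD ws i.1 ""]))]
  rw [List.nil_append]
  simp only [List.flatMap_subtype, List.unattach_attach]

lemma bRec_combinations (ws : List String) (n : Int) (hn : 0 ≤ n) :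
    ∀ (d : Nat) (start : Nat) (chosen : List String),
      ws.length - start = d → start ≤ ws.length → chosen.length ≤ n.toNat →
      bRec ws n start chosen =
        (PySem.List.combinations (ws.drop start) (n.toNat - chosen.length)).map (chosen ++ ·) := by
  intro d
  induction d using Nat.strong_induction_on with
  | _ d ih =>
    intro start chosen hd hstart hlen
    by_cases hstop : (chosen.length : Int) = n
    · have h0 : n.toNat - chosen.length = 0 := by omega
      rw [bRec, if_pos hstop, h0, PySem.List.combinations_zero]
      simp
    · have hlt : chosen.length < n.toNat := by
        rcases lt_or_eq_of_le hlen with h | h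
        · exact h
        · exact absurd (by omega : (chosen.length : Int) = n) hstop
      rw [bRec_flatMap ws n start chosen hstop]
      rcases Nat.eq_or_lt_of_le hstart with heq | hlt'
      · rw [heq]
        rw [PySem.List.pyRange_one_eq_nil (by omega)]
        rw [List.drop_length]
        rw [PySem.List.combinations_eq_nil_of_length_lt ([] : List String)
          (by simp only [List.length_nil]; omega)]
        simp
      · -- start < ws.length : peel off index `start`
        rw [PySem.List.pyRange_one_cons (by exact_mod_cast hlt')]
        rw [List.flatMap_cons]
        have hget : PySem.List.pyGetD ws ((start : Nat) : Int) "" = ws[start] := by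
          rw [PySem.List.pyGetD_natCast]
          exact List.getD_eq_getElem ws "" hlt'
        have htail :
            (PySem.List.pyRange ((start : Int) + 1) (ws.length : Int) 1).flatMap
                (fun i => bRec ws n (i.toNat + 1) (chosen ++ [PySem.List.pyGetD ws i ""])) =
              bRec ws n (start + 1) chosen := by
          rw [bRec_flatMap ws n (start + 1) chosen hstop]
          norm_cast
        have hfirst :
            bRec ws n (((start : Int)).toNat + 1) (chosen ++ [PySem.List.pyGetD ws (start : Int) ""]) =
              (PySem.List.combinations (ws.drop (start + 1))
                  (n.toNat - (chosen.length + 1))).map ((chosen ++ [ws[start]]) ++ ·) := by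
          rw [hget]
          have := ih (ws.length - (start + 1)) (by omega) (start + 1)
            (chosen ++ [ws[start]]) rfl (by omega) (by simp; omega)
          simpa using this
        have hsecond : bRec ws n (start + 1) chosen =
            (PySem.List.combinations (ws.drop (start + 1))
                (n.toNat - chosen.length)).map (chosen ++ ·) :=
          ih (ws.length - (start + 1)) (by omega) (start + 1) chosen rfl (by omega) hlen
        rw [hfirst, htail, hsecond]
        rw [List.drop_eq_getElem_cons hlt']
        have hk : n.toNat - chosen.length = (n.toNat - (chosen.length + 1)) + 1 := by omega
        rw [hk, PySem.List.combinations_cons_succ, List.map_append, List.map_map]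
        congr 1
        apply List.map_congr_left
        intro c _
        simp

lemma getcomb_alt_eq_mid (words : List String) (n : Int) :
    getcomb_alt words n =
      PySem.List.sorted
        (PySem.Set.ofList
          (if 0 < n then
            PySem.List.combinations (PySem.List.sorted words (fun x => x) false) n.toNat
          else []))
        (fun x => x) false := by
  rcases le_or_gt n 0 with hn | hn
  · rw [getcomb_alt, if_neg (by omega), if_neg (by omega)]
  · rw [getcomb_alt, if_pos hn, if_pos hn]
    rw [bRec_combinations (PySem.List.sorted words (fun x => x) false) n (le_of_lt hn)
      ((PySem.List.sorted words (fun x => x) false).length) 0 [] (by omega) (by omega) (by simp)]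
    simp

-- ===== VERDICT (by name: the statement is the Claim_ definition above) =====
theorem getcomb_spec : Claim_equal_getcomb := by
  intro words n _
  show getcomb words n = getcomb_alt words n
  rw [getcomb_eq_mid, getcomb_alt_eq_mid]
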